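-- pv_equiv track=rewrite | github.com/Jacob898/Algorithms-and-Data-Structures-AGH | ASD-AGH/Sorting_Algorithms/radix_sort_words.py | counting_sort_word
-- ===== SOURCE A (Python) =====
-- def counting_sort_word(A,letter, k=26):
--     n = len(A)
--     B = [None] * n
--     C = [0] * k
--
--     for x in range(n):
--         C[ord(A[x][letter])-ord('a')] += 1
--     for i in range(1, k):
--         C[i] += C[i - 1]
--
--     for i in range(n - 1, -1, -1):  # range(0, n)[::-1]
--         B[C[ord(A[i][letter])-ord('a')] - 1] = A[i]
--         C[ord(A[i][letter])-ord('a')] -= 1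
--
--     for i in range(n):
--         A[i]=B[i]
--     return A
-- ===== SOURCE B (Python) =====
-- def counting_sort_word(A, letter, k=26):
--     # Bucket sort: one forward pass distributing words into k buckets
--     # (indexed exactly like A's count array, so negative-index wrap and
--     # IndexError behave the same), then write them back into A in order.
--     buckets = [[] for _ in range(k)]
--     for w in A:
--         buckets[ord(w[letter]) - ord('a')].append(w)
--     out = [w for b in buckets for w in b]
--     for i in range(len(out)):
--         A[i] = out[i]
--     return A
-- ===== Notes on version B (the rewrite author's own statement) =====
-- stated objective: simpler
-- what changed: Replaces the three-pass counting sort (count array, prefix sums, backward placement into a buffer) by a single forward distribution pass into k buckets followed by writing the buckets back in order; stability comes from append order instead of prefix-sum arithmetic.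
import Mathlib
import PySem

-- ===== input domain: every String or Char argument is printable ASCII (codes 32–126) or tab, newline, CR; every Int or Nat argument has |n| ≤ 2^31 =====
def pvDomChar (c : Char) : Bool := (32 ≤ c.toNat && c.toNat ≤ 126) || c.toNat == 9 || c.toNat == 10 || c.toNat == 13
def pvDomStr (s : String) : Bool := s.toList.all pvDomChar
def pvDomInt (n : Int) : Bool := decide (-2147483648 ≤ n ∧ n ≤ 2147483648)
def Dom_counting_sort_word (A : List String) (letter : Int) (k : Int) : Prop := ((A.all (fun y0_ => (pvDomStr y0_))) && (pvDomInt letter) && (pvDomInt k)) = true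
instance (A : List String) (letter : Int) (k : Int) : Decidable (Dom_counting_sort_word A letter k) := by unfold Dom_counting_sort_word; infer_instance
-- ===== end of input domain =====

-- B replaces A's three-pass counting sort by a bucket sort (one distribution pass, then
-- write the buckets back); equivalence is about the RETURN value only (both Pythons also
-- write the result into A in place).

-- ord(w[letter]) - ord('a')  (97 = ord('a'); the ' ' default is unreachable under Pre_)
def pvIdxOf (letter : Int) (w : String) : Int :=
  (((PySem.Str.pyGet? w letter).getD ' ').toNat : Int) - 97

-- ===== PORT A =====
-- for x in range(n): C[ord(A[x][letter])-ord('a')] += 1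
def pvA_count (letter : Int) (A : List String) (C0 : List Int) : List Int :=
  (PySem.List.pyRange 0 (A.length : Int) 1).foldl (fun C x =>
      PySem.List.pySetD C (pvIdxOf letter (PySem.List.pyGetD A x ""))
        (PySem.List.pyGetD C (pvIdxOf letter (PySem.List.pyGetD A x "")) 0 + 1)) C0
-- for i in range(1, k): C[i] += C[i-1]
def pvA_prefix (k : Int) (C0 : List Int) : List Int :=
  (PySem.List.pyRange 1 k 1).foldl (fun C i =>
      PySem.List.pySetD C i (PySem.List.pyGetD C i 0 + PySem.List.pyGetD C (i - 1) 0)) C0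
-- for i in range(n-1, -1, -1): B[C[ord(A[i][letter])-ord('a')]-1] = A[i]; C[...] -= 1
def pvA_place (letter : Int) (A : List String) (init : List (Option String) × List Int) :
    List (Option String) × List Int :=
  (PySem.List.pyRange ((A.length : Int) - 1) (-1) (-1)).foldl (fun BC i =>
      (PySem.List.pySetD BC.1
         (PySem.List.pyGetD BC.2 (pvIdxOf letter (PySem.List.pyGetD A i "")) 0 - 1)
         (some (PySem.List.pyGetD A i "")),
       PySem.List.pySetD BC.2 (pvIdxOf letter (PySem.List.pyGetD A i ""))
         (PySem.List.pyGetD BC.2 (pvIdxOf letter (PySem.List.pyGetD A i "")) 0 - 1))) init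
-- for i in range(n): A[i] = B[i]   (B[i] is never None under Pre_, so .getD "" is exact)
def pvA_write (A : List String) (B : List (Option String)) : List String :=
  (PySem.List.pyRange 0 (A.length : Int) 1).foldl (fun Acc i =>
      PySem.List.pySetD Acc i ((PySem.List.pyGetD B i none).getD "")) A

def counting_sort_word (A : List String) (letter : Int) (k : Int) : List String :=
  pvA_write A
    (pvA_place letter A
      (List.replicate A.length none,
       pvA_prefix k (pvA_count letter A (List.replicate k.toNat 0)))).1

-- ===== PORT B =====
-- for w in A: buckets[ord(w[letter]) - ord('a')].append(w)
def pvB_fill (letter : Int) (A : List String) (bs0 : List (List String)) : List (List String) :=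
  A.foldl (fun bs w =>
      PySem.List.pySetD bs (pvIdxOf letter w)
        (PySem.List.pyGetD bs (pvIdxOf letter w) [] ++ [w])) bs0
-- for i in range(len(out)): A[i] = out[i]
def pvB_write (A out : List String) : List String :=
  (PySem.List.pyRange 0 (out.length : Int) 1).foldl (fun Acc i =>
      PySem.List.pySetD Acc i (PySem.List.pyGetD out i "")) A

def counting_sort_word_alt (A : List String) (letter : Int) (k : Int) : List String :=
  -- buckets = [[] for _ in range(k)]
  let buckets : List (List String) :=
    pvB_fill letter A ((PySem.List.pyRange 0 k 1).map (fun _ => ([] : List String)))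
  -- out = [w for b in buckets for w in b]
  let out : List String := buckets.flatMap (fun b => b)
  pvB_write A out

-- ===== PRECONDITION & SPEC =====
-- w[letter] exists and its bucket index ord(w[letter])-ord('a') is a valid (possibly
-- negative, Python-wrapping) index into the k-cell count/bucket array; otherwise the
-- Python A raises IndexError.
def pvKeyOk (letter k : Int) (w : String) : Bool :=
  match PySem.Str.pyGet? w letter with
  | some c => decide (-k ≤ (c.toNat : Int) - 97 ∧ (c.toNat : Int) - 97 < k)
  | none => false

def Pre_counting_sort_word (A : List String) (letter : Int) (k : Int) : Prop :=
  ∀ w ∈ A, pvKeyOk letter k w = true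
instance (A : List String) (letter : Int) (k : Int) : Decidable (Pre_counting_sort_word A letter k) := by
  unfold Pre_counting_sort_word; infer_instance

def pvWitness_counting_sort_word : List String × Int × Int := (["ba", "ab", "ca"], 0, 26)

def Spec_counting_sort_word (A : List String) (letter : Int) (k : Int) (out : List String) : Prop := out = counting_sort_word_alt A letter k
instance (A : List String) (letter : Int) (k : Int) (out : List String) : Decidable (Spec_counting_sort_word A letter k out) := by unfold Spec_counting_sort_word; infer_instance

-- ===== CLAIM (what is proved, stated in full; the proofs are below) =====
def Claim_equal_counting_sort_word : Prop := ∀ (A : List String) (letter : Int) (k : Int), Dom_counting_sort_word A letter k → Pre_counting_sort_word A letter k → Spec_counting_sort_word A letter k (counting_sort_word A letter k)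

-- ===== LEMMAS AND PROOFS =====

-- effective (wrapped) bucket index, as a Nat
def pvE (letter k : Int) (w : String) : Nat :=
  (if pvIdxOf letter w < 0 then pvIdxOf letter w + k else pvIdxOf letter w).toNat
-- the bucket of j, its size, the start offset of bucket j, and the sorted result
def pvBucket (letter k : Int) (A : List String) (j : Nat) : List String :=
  A.filter (fun w => pvE letter k w == j)
def pvCnt (letter k : Int) (A : List String) (j : Nat) : Nat := (pvBucket letter k A j).length
def pvOff (letter k : Int) (A : List String) (j : Nat) : Nat :=
  ((List.range j).map (pvCnt letter k A)).sum
def pvTgt (letter k : Int) (A : List String) : List String :=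
  ((List.range k.toNat).map (pvBucket letter k A)).flatten
-- count of key j among the first i words
def pvCntT (letter k : Int) (A : List String) (i j : Nat) : Nat :=
  (A.take i).countP (fun w => pvE letter k w == j)
-- the count array and placement buffer after the backward loop has processed indices ≥ i
def pvCspec (letter k : Int) (A : List String) (i : Nat) : List Int :=
  (List.range k.toNat).map (fun j => ((pvOff letter k A j + pvCntT letter k A i j : Nat) : Int))
def pvBspec (letter k : Int) (A : List String) (i : Nat) : List (Option String) :=
  (List.range A.length).map (fun p =>
    if pvOff letter k A (pvE letter k ((pvTgt letter k A).getD p "")) +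
       pvCntT letter k A i (pvE letter k ((pvTgt letter k A).getD p "")) ≤ p
    then some ((pvTgt letter k A).getD p "") else none)

lemma pv_code_of_ok {letter k : Int} {w : String} (h : pvKeyOk letter k w = true) :
    -k ≤ pvIdxOf letter w ∧ pvIdxOf letter w < k := by
  unfold pvKeyOk at h
  unfold pvIdxOf
  rcases hg : PySem.Str.pyGet? w letter with _ | c <;> rw [hg] at h
  · simp at h
  · simp only [Option.getD_some]
    simpa using h

lemma pv_kpos {letter k : Int} {w : String} (h : pvKeyOk letter k w = true) : 0 < k := by
  have := pv_code_of_ok h; omega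

lemma pvE_lt {letter k : Int} {w : String} (h : pvKeyOk letter k w = true) :
    pvE letter k w < k.toNat := by
  have := pv_code_of_ok h
  unfold pvE; omega

lemma pv_wrap_getD {α : Type} (xs : List α) (i : Int) (d : α)
    (h1 : -(xs.length : Int) ≤ i) (h2 : i < (xs.length : Int)) :
    PySem.List.pyGetD xs i d = xs.getD (if i < 0 then i + xs.length else i).toNat d := by
  by_cases hi : i < 0
  · obtain ⟨m, hm⟩ : ∃ m : Nat, i = -(m : Int) := ⟨(-i).toNat, by omega⟩
    subst hm
    rw [PySem.List.pyGetD_neg_natCast xs m d (by omega) (by omega)]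
    rw [List.getD_eq_getElem _ _ (by omega : (if -(m:Int) < 0 then -(m:Int) + xs.length else -(m:Int)).toNat < xs.length)]
    congr 1
    omega
  · rw [PySem.List.pyGetD_eq_getElem xs d (by omega) h2]
    rw [List.getD_eq_getElem _ _ (by omega : (if i < 0 then i + xs.length else i).toNat < xs.length)]
    congr 1
    omega

lemma pv_wrap_setD {α : Type} (xs : List α) (i : Int) (v : α)
    (h1 : -(xs.length : Int) ≤ i) (h2 : i < (xs.length : Int)) :
    PySem.List.pySetD xs i v = xs.set (if i < 0 then i + xs.length else i).toNat v := by
  by_cases hi : i < 0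
  · obtain ⟨m, hm⟩ : ∃ m : Nat, i = -(m : Int) := ⟨(-i).toNat, by omega⟩
    subst hm
    simp only [PySem.List.pySetD, PySem.List.pySet?, PySem.List.pyIdx?]
    rw [if_neg (by omega), if_pos (by omega)]
    simp only [Option.map_some, Option.getD_some]
    congr 1
    omega
  · rw [PySem.List.pySetD_of_nonneg xs v (by omega)]
    congr 1
    omega

lemma pv_set_map_range {α : Type} (f : Nat → α) (m t : Nat) (v : α) :
    ((List.range m).map f).set t v = (List.range m).map (fun j => if j = t then v else f j) := by
  apply List.ext_getElem
  · simp
  · intro i h1 h2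
    simp only [List.getElem_set, List.getElem_map, List.getElem_range]
    by_cases h : t = i
    · subst h; simp
    · rw [if_neg h, if_neg (fun hh => h hh.symm)]

-- a word admitted by Pre_ indexes the k-cell arrays at effective position pvE
lemma pv_getD_code {α : Type} {letter k : Int} {w : String} (h : pvKeyOk letter k w = true)
    (xs : List α) (hlen : xs.length = k.toNat) (d : α) :
    PySem.List.pyGetD xs (pvIdxOf letter w) d = xs.getD (pvE letter k w) d := by
  have hb := pv_code_of_ok h
  have hk := pv_kpos h
  rw [pv_wrap_getD xs _ d (by omega) (by omega)]
  congr 1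
  unfold pvE; omega

lemma pv_setD_code {α : Type} {letter k : Int} {w : String} (h : pvKeyOk letter k w = true)
    (xs : List α) (hlen : xs.length = k.toNat) (v : α) :
    PySem.List.pySetD xs (pvIdxOf letter w) v = xs.set (pvE letter k w) v := by
  have hb := pv_code_of_ok h
  have hk := pv_kpos h
  rw [pv_wrap_setD xs _ v (by omega) (by omega)]
  congr 1
  unfold pvE; omega

lemma pv_count_fold (letter k : Int) (ws : List String) :
    ∀ f : Nat → Int, (∀ w ∈ ws, pvKeyOk letter k w = true) →
    ws.foldl (fun C w => PySem.List.pySetD C (pvIdxOf letter w)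
        (PySem.List.pyGetD C (pvIdxOf letter w) 0 + 1)) ((List.range k.toNat).map f)
      = (List.range k.toNat).map (fun j => f j + (ws.countP (fun w => pvE letter k w == j) : Int)) := by
  induction ws with
  | nil => intro f _; simp
  | cons w ws ih =>
    intro f h
    have hokw : pvKeyOk letter k w = true := h w List.mem_cons_self
    have hoks : ∀ w' ∈ ws, pvKeyOk letter k w' = true :=
      fun w' hw' => h w' (List.mem_cons_of_mem _ hw')
    rw [List.foldl_cons,
        pv_getD_code hokw ((List.range k.toNat).map f) (by simp) 0,
        pv_setD_code hokw ((List.range k.toNat).map f) (by simp),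
        PySem.List.getD_map_range _ _ _ _ (pvE_lt hokw),
        pv_set_map_range,
        ih _ hoks]
    apply List.map_congr_left
    intro j hj
    simp only [List.mem_range] at hj
    by_cases hje : j = pvE letter k w
    · subst hje
      rw [if_pos rfl]
      simp only [List.countP_cons, beq_self_eq_true]
      push_cast
      ring
    · rw [if_neg hje]
      have hb : (pvE letter k w == j) = false := by
        simp [Ne.symm hje]
      simp [hb]

lemma pvOff_succ (letter k : Int) (A : List String) (j : Nat) :
    pvOff letter k A (j + 1) = pvOff letter k A j + pvCnt letter k A j := by
  simp [pvOff, List.range_succ]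

lemma pvOff_le (letter k : Int) (A : List String) {j m : Nat} (h : j ≤ m) :
    pvOff letter k A j ≤ pvOff letter k A m := by
  induction m with
  | zero => have : j = 0 := Nat.le_zero.mp h; subst this; exact le_rfl
  | succ m ih =>
    rcases Nat.eq_or_lt_of_le h with rfl | hlt
    · omega
    · have := ih (by omega)
      rw [pvOff_succ]; omega

lemma pv_prefix_fold (letter k : Int) (A : List String) (_hk : 0 < k) :
    ∀ m : Nat, m ≤ k.toNat →
    (PySem.List.pyRange 1 (m : Int) 1).foldl (fun C i =>
        PySem.List.pySetD C i (PySem.List.pyGetD C i 0 + PySem.List.pyGetD C (i - 1) 0))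
      ((List.range k.toNat).map (fun j => (pvCnt letter k A j : Int)))
      = (List.range k.toNat).map (fun j =>
          if j < m then ((pvOff letter k A (j + 1) : Nat) : Int) else (pvCnt letter k A j : Int)) := by
  intro m
  induction m with
  | zero =>
    intro _
    rw [show ((0:Nat) : Int) = 0 from rfl, PySem.List.pyRange_one_eq_nil (by norm_num)]
    simp
  | succ m ih =>
    intro hm
    by_cases hm0 : m = 0
    · subst hm0
      rw [show ((1:Nat) : Int) = 1 from rfl, PySem.List.pyRange_one_eq_nil (by norm_num)]
      simp only [List.foldl_nil]
      apply List.map_congr_left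
      intro j hj
      simp only [List.mem_range] at hj
      by_cases hj0 : j = 0
      · subst hj0
        rw [if_pos (by omega)]
        simp [pvOff]
      · rw [if_neg (by omega)]
    · have h1 : 1 ≤ m := by omega
      rw [show ((m+1 : Nat) : Int) = (m : Int) + 1 by push_cast; ring,
          PySem.List.pyRange_one_succ_right (by exact_mod_cast h1),
          List.foldl_append, ih (by omega), List.foldl_cons, List.foldl_nil]
      rw [show ((m:Int) - 1) = ((m - 1 : Nat) : Int) by omega]
      rw [PySem.List.pyGetD_natCast, PySem.List.pyGetD_natCast, PySem.List.pySetD_natCast]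
      rw [PySem.List.getD_map_range _ _ _ _ (by omega : m < k.toNat),
          PySem.List.getD_map_range _ _ _ _ (by omega : m - 1 < k.toNat)]
      rw [if_neg (lt_irrefl m), if_pos (by omega : m - 1 < m)]
      rw [show m - 1 + 1 = m by omega]
      rw [pv_set_map_range]
      apply List.map_congr_left
      intro j hj
      simp only [List.mem_range] at hj
      by_cases hjm : j = m
      · subst hjm
        rw [if_pos rfl, if_pos (by omega)]
        push_cast [pvOff_succ]
        ring
      · rw [if_neg hjm]
        by_cases hlt : j < m
        · rw [if_pos hlt, if_pos (by omega)]
        · rw [if_neg hlt, if_neg (by omega)]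

lemma pv_sum_map_add {α : Type} (l : List α) (f g : α → Nat) :
    (l.map (fun x => f x + g x)).sum = (l.map f).sum + (l.map g).sum := by
  induction l with
  | nil => simp
  | cons a l ih => simp [ih]; omega

lemma pv_sum_indicator : ∀ (K t : Nat),
    ((List.range K).map (fun j => if t = j then 1 else 0)).sum = if t < K then 1 else 0 := by
  intro K
  induction K with
  | zero => intro t; simp
  | succ K ih =>
    intro t
    rw [List.range_succ, List.map_append, List.sum_append, ih]
    simp only [List.map_cons, List.map_nil, List.sum_cons, List.sum_nil]
    split_ifs <;> omega

lemma pv_sum_cnt (letter k : Int) (ws : List String) (h : ∀ w ∈ ws, pvKeyOk letter k w = true) :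
    ((List.range k.toNat).map (fun j => ws.countP (fun w => pvE letter k w == j))).sum = ws.length := by
  induction ws with
  | nil => simp
  | cons w ws ih =>
    have hokw : pvKeyOk letter k w = true := h w List.mem_cons_self
    have hoks : ∀ w' ∈ ws, pvKeyOk letter k w' = true :=
      fun w' hw' => h w' (List.mem_cons_of_mem _ hw')
    have he := pvE_lt hokw
    simp only [List.countP_cons, List.length_cons]
    have hcongr : ((List.range k.toNat).map (fun j =>
        ws.countP (fun w' => pvE letter k w' == j) + if (pvE letter k w == j) then 1 else 0))
        = ((List.range k.toNat).map (fun j =>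
        ws.countP (fun w' => pvE letter k w' == j) + if (pvE letter k w = j) then 1 else 0)) := by
      apply List.map_congr_left
      intro j _
      by_cases hj : pvE letter k w = j <;> simp [hj]
    rw [hcongr, pv_sum_map_add, ih hoks, pv_sum_indicator, if_pos he]

lemma pv_off_top (letter k : Int) (A : List String) (h : ∀ w ∈ A, pvKeyOk letter k w = true) :
    pvOff letter k A k.toNat = A.length := by
  have h1 : pvOff letter k A k.toNat
      = ((List.range k.toNat).map (fun j => A.countP (fun w => pvE letter k w == j))).sum := by
    unfold pvOff
    apply congrArg List.sum
    apply List.map_congr_left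
    intro j _
    simp [pvCnt, pvBucket, List.countP_eq_length_filter]
  rw [h1]
  exact pv_sum_cnt letter k A h

lemma pv_tgt_len (letter k : Int) (A : List String) (h : ∀ w ∈ A, pvKeyOk letter k w = true) :
    (pvTgt letter k A).length = A.length := by
  rw [← pv_off_top letter k A h]
  unfold pvTgt pvOff
  rw [List.length_flatten, List.map_map]
  apply congrArg List.sum
  apply List.map_congr_left
  intro x _
  simp [pvCnt]

lemma pv_bucket_e {letter k : Int} {A : List String} {j : Nat} {w : String}
    (h : w ∈ pvBucket letter k A j) : pvE letter k w = j := by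
  have := (List.mem_filter.mp h).2
  simpa using this

lemma pv_tgt_getD (letter k : Int) (A : List String) (j r : Nat)
    (hj : j < k.toNat) (hr : r < pvCnt letter k A j) :
    (pvTgt letter k A).getD (pvOff letter k A j + r) "" = (pvBucket letter k A j).getD r "" := by
  have hK : k.toNat = j + (k.toNat - j - 1 + 1) := by omega
  unfold pvTgt
  rw [hK, List.range_add, List.map_append, List.flatten_append, List.range_succ_eq_map]
  simp only [List.map_cons, List.map_map, List.flatten_cons, Nat.add_zero]
  have hlenP : (((List.range j).map (pvBucket letter k A)).flatten).length
      = pvOff letter k A j := by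
    rw [List.length_flatten, List.map_map]
    unfold pvOff
    apply congrArg List.sum
    apply List.map_congr_left
    intro x _
    simp [pvCnt]
  rw [List.getD_append_right _ _ _ _ (by rw [hlenP]; omega)]
  rw [hlenP, Nat.add_sub_cancel_left]
  exact List.getD_append _ _ _ r hr

lemma pv_flatten_decomp {α : Type} :
    ∀ (Ls : List (List α)) (p : Nat), p < Ls.flatten.length →
    ∃ j r, j < Ls.length ∧ r < (Ls.getD j []).length ∧
      p = (((Ls.take j).map List.length).sum + r) := by
  intro Ls
  induction Ls with
  | nil => intro p hp; simp at hp
  | cons L Ls ih =>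
    intro p hp
    by_cases h : p < L.length
    · exact ⟨0, p, by simp, by simpa using h, by simp⟩
    · rw [List.flatten_cons, List.length_append] at hp
      obtain ⟨j, r, hj, hr, he⟩ := ih (p - L.length) (by omega)
      refine ⟨j + 1, r, by simpa using hj, by simpa using hr, ?_⟩
      rw [List.take_succ_cons, List.map_cons, List.sum_cons]
      omega

lemma pv_tgt_decomp (letter k : Int) (A : List String) (p : Nat)
    (hp : p < (pvTgt letter k A).length) :
    ∃ j r, j < k.toNat ∧ r < pvCnt letter k A j ∧ p = pvOff letter k A j + r := by
  obtain ⟨j, r, hj, hr, he⟩ := pv_flatten_decomp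
    ((List.range k.toNat).map (pvBucket letter k A)) p (by simpa [pvTgt] using hp)
  rw [List.length_map, List.length_range] at hj
  refine ⟨j, r, hj, ?_, ?_⟩
  · rwa [PySem.List.getD_map_range _ _ _ _ hj] at hr
  · rw [← List.map_take, List.take_range, min_eq_left (le_of_lt hj), List.map_map] at he
    rw [he]
    rfl

lemma pv_filter_rank (letter k : Int) :
    ∀ (ws : List String) (i : Nat) (hi : i < ws.length),
    (ws.take i).countP (fun w => pvE letter k w == pvE letter k ws[i]) <
        pvCnt letter k ws (pvE letter k ws[i]) ∧
    (pvBucket letter k ws (pvE letter k ws[i])).getD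
        ((ws.take i).countP (fun w => pvE letter k w == pvE letter k ws[i])) "" = ws[i] := by
  intro ws
  induction ws with
  | nil => intro i hi; simp at hi
  | cons w ws ih =>
    intro i hi
    cases i with
    | zero =>
      simp only [List.getElem_cons_zero, List.take_zero, List.countP_nil]
      unfold pvCnt pvBucket
      rw [List.filter_cons, if_pos (by simp)]
      exact ⟨by simp, by simp⟩
    | succ i =>
      have hi' : i < ws.length := by simpa using hi
      obtain ⟨ih1, ih2⟩ := ih i hi'
      unfold pvCnt pvBucket at ih1
      unfold pvBucket at ih2
      simp only [List.getElem_cons_succ, List.take_succ_cons, List.countP_cons]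
      unfold pvCnt pvBucket
      rw [List.filter_cons]
      by_cases hw : pvE letter k w = pvE letter k ws[i]
      · have hb : (pvE letter k w == pvE letter k ws[i]) = true := by simpa using hw
        rw [if_pos hb, if_pos hb]
        refine ⟨?_, ?_⟩
        · simp only [List.length_cons]
          omega
        · rw [List.getD_cons_succ]
          exact ih2
      · have hb : ¬((pvE letter k w == pvE letter k ws[i]) = true) := by simp [hw]
        rw [if_neg hb, if_neg hb, Nat.add_zero]
        exact ⟨ih1, ih2⟩

lemma pv_cntT_succ (letter k : Int) (A : List String) (i j : Nat) (hi : i < A.length) :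
    pvCntT letter k A (i + 1) j
      = pvCntT letter k A i j + (if pvE letter k A[i] = j then 1 else 0) := by
  unfold pvCntT
  rw [List.take_add_one, List.getElem?_eq_getElem hi, List.countP_append]
  by_cases h : pvE letter k A[i] = j
  · rw [if_pos h]
    simp [h]
  · rw [if_neg h]
    simp [h]

lemma pv_decomp_unique (letter k : Int) (A : List String) {j r j' r' : Nat}
    (hr : r < pvCnt letter k A j) (hr' : r' < pvCnt letter k A j')
    (h : pvOff letter k A j + r = pvOff letter k A j' + r') : j = j' ∧ r = r' := by
  rcases Nat.lt_trichotomy j j' with hlt | heq | hgt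
  · exfalso
    have h1 : pvOff letter k A (j+1) ≤ pvOff letter k A j' := pvOff_le letter k A (by omega)
    have h2 := pvOff_succ letter k A j
    omega
  · subst heq; omega
  · exfalso
    have h1 : pvOff letter k A (j'+1) ≤ pvOff letter k A j := pvOff_le letter k A (by omega)
    have h2 := pvOff_succ letter k A j'
    omega

lemma pv_place_step (letter k : Int) (A : List String)
    (hok : ∀ w ∈ A, pvKeyOk letter k w = true) (i : Nat) (hi : i < A.length) :
    ((fun (BC : List (Option String) × List Int) (x : Int) =>
      (PySem.List.pySetD BC.1
         (PySem.List.pyGetD BC.2 (pvIdxOf letter (PySem.List.pyGetD A x "")) 0 - 1)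
         (some (PySem.List.pyGetD A x "")),
       PySem.List.pySetD BC.2 (pvIdxOf letter (PySem.List.pyGetD A x ""))
         (PySem.List.pyGetD BC.2 (pvIdxOf letter (PySem.List.pyGetD A x "")) 0 - 1)))
      (pvBspec letter k A (i+1), pvCspec letter k A (i+1)) (i : Int))
    = (pvBspec letter k A i, pvCspec letter k A i) := by
  have hokw : pvKeyOk letter k A[i] = true := hok _ (List.getElem_mem hi)
  have hk := pv_kpos hokw
  have hE : pvE letter k A[i] < k.toNat := pvE_lt hokw
  have hw : PySem.List.pyGetD A (i : Int) "" = A[i] := by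
    rw [PySem.List.pyGetD_natCast]; exact List.getD_eq_getElem _ _ hi
  simp only [hw]
  set e := pvE letter k A[i] with he
  have hlenC : (pvCspec letter k A (i+1)).length = k.toNat := by simp [pvCspec]
  have hrank := pv_filter_rank letter k A i hi
  have hlt : pvCntT letter k A i e < pvCnt letter k A e := hrank.1
  have hval : (pvBucket letter k A e).getD (pvCntT letter k A i e) "" = A[i] := hrank.2
  have hgetC : PySem.List.pyGetD (pvCspec letter k A (i+1)) (pvIdxOf letter A[i]) 0
      = ((pvOff letter k A e + pvCntT letter k A (i+1) e : Nat) : Int) := by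
    rw [pv_getD_code hokw _ hlenC 0]
    unfold pvCspec
    exact PySem.List.getD_map_range _ _ _ _ hE
  have hcsucc : pvCntT letter k A (i+1) e = pvCntT letter k A i e + 1 := by
    rw [pv_cntT_succ letter k A i e hi, if_pos rfl]
  have hofftop : pvOff letter k A k.toNat = A.length := pv_off_top letter k A hok
  have hbound : pvOff letter k A e + pvCnt letter k A e ≤ A.length := by
    rw [← pvOff_succ, ← hofftop]
    exact pvOff_le letter k A (by omega)
  have hq : PySem.List.pyGetD (pvCspec letter k A (i+1)) (pvIdxOf letter A[i]) 0 - 1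
      = ((pvOff letter k A e + pvCntT letter k A i e : Nat) : Int) := by
    rw [hgetC, hcsucc]; push_cast; ring
  rw [hq]
  simp only [Prod.mk.injEq]
  constructor
  · -- placement buffer component
    rw [PySem.List.pySetD_natCast]
    unfold pvBspec
    rw [pv_set_map_range]
    apply List.map_congr_left
    intro p hp
    simp only [List.mem_range] at hp
    have hplen : p < (pvTgt letter k A).length := by
      rw [pv_tgt_len letter k A hok]; exact hp
    obtain ⟨j, r, hj, hr, hpe⟩ := pv_tgt_decomp letter k A p hplen
    have htp : (pvTgt letter k A).getD p "" = (pvBucket letter k A j).getD r "" := by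
      rw [hpe]; exact pv_tgt_getD letter k A j r hj hr
    have htpmem : (pvBucket letter k A j).getD r "" ∈ pvBucket letter k A j := by
      rw [List.getD_eq_getElem _ _ hr]; exact List.getElem_mem _
    have hjp : pvE letter k ((pvTgt letter k A).getD p "") = j := by
      rw [htp]; exact pv_bucket_e htpmem
    by_cases hpq : p = pvOff letter k A e + pvCntT letter k A i e
    · rw [if_pos hpq]
      obtain ⟨hje, hre⟩ := pv_decomp_unique letter k A hr hlt (by omega)
      subst hje
      rw [hjp, if_pos (by omega)]
      rw [htp, hre, hval]
    · rw [if_neg hpq, hjp]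
      by_cases hje : j = e
      · rw [hje, hcsucc]
        by_cases hc : pvOff letter k A e + pvCntT letter k A i e ≤ p
        · rw [if_pos (by omega), if_pos hc]
        · rw [if_neg (by omega), if_neg hc]
      · have hcne : pvCntT letter k A (i+1) j = pvCntT letter k A i j := by
          rw [pv_cntT_succ letter k A i j hi,
              if_neg (show ¬pvE letter k A[i] = j from
                fun hh => hje (by rw [he]; exact hh.symm)), Nat.add_zero]
        rw [hcne]
  · -- count array component
    rw [pv_setD_code hokw _ hlenC]
    unfold pvCspec
    rw [pv_set_map_range]
    apply List.map_congr_left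
    intro j hj
    simp only [List.mem_range] at hj
    by_cases hje : j = e
    · rw [if_pos hje, hje]
    · have hcne : pvCntT letter k A (i+1) j = pvCntT letter k A i j := by
        rw [pv_cntT_succ letter k A i j hi,
            if_neg (show ¬pvE letter k A[i] = j from
              fun hh => hje (by rw [he]; exact hh.symm)), Nat.add_zero]
      rw [if_neg hje, hcne]

lemma pv_place_fold (letter k : Int) (A : List String)
    (hok : ∀ w ∈ A, pvKeyOk letter k w = true) :
    ∀ (d i : Nat), i + d = A.length →
    (List.range' i d).foldr (fun (x : Nat) BC =>
      (PySem.List.pySetD (Prod.fst BC)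
         (PySem.List.pyGetD (Prod.snd BC) (pvIdxOf letter (PySem.List.pyGetD A (x : Int) "")) 0 - 1)
         (some (PySem.List.pyGetD A (x : Int) "")),
       PySem.List.pySetD (Prod.snd BC) (pvIdxOf letter (PySem.List.pyGetD A (x : Int) ""))
         (PySem.List.pyGetD (Prod.snd BC) (pvIdxOf letter (PySem.List.pyGetD A (x : Int) "")) 0 - 1)))
      (pvBspec letter k A A.length, pvCspec letter k A A.length)
      = (pvBspec letter k A i, pvCspec letter k A i) := by
  intro d
  induction d with
  | zero =>
    intro i h
    obtain rfl : i = A.length := by omega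
    rfl
  | succ d ih =>
    intro i h
    rw [List.range'_succ, List.foldr_cons, ih (i+1) (by omega)]
    exact pv_place_step letter k A hok i (by omega)

lemma pv_writeback {α : Type} (g : Nat → α) (G : Int → α) :
    ∀ (t : Nat) (xs : List α), t ≤ xs.length → (∀ p : Nat, p < t → G (p : Int) = g p) →
    (PySem.List.pyRange 0 (t : Int) 1).foldl (fun acc i => PySem.List.pySetD acc i (G i)) xs
      = (List.range t).map g ++ xs.drop t := by
  intro t
  induction t with
  | zero =>
    intro xs _ _
    rw [show ((0:Nat) : Int) = 0 from rfl, PySem.List.pyRange_one_eq_nil (le_refl 0)]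
    simp
  | succ t ih =>
    intro xs h hG
    rw [show ((t+1 : Nat) : Int) = (t : Int) + 1 by push_cast; ring,
        PySem.List.pyRange_one_succ_right (by exact_mod_cast t.zero_le),
        List.foldl_append, ih xs (by omega) (fun p hp => hG p (by omega)),
        List.foldl_cons, List.foldl_nil, hG t (by omega), PySem.List.pySetD_natCast]
    have hlen : ((List.range t).map g).length = t := by simp
    rw [List.set_append_right _ _ (by rw [hlen]), hlen, Nat.sub_self]
    rw [List.drop_eq_getElem_cons (by omega : t < xs.length), List.set_cons_zero]
    rw [List.range_succ, List.map_append]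
    simp

lemma pv_bucket_fold (letter k : Int) (ws : List String) :
    ∀ f : Nat → List String, (∀ w ∈ ws, pvKeyOk letter k w = true) →
    ws.foldl (fun bs w => PySem.List.pySetD bs (pvIdxOf letter w)
        (PySem.List.pyGetD bs (pvIdxOf letter w) [] ++ [w])) ((List.range k.toNat).map f)
      = (List.range k.toNat).map (fun j => f j ++ ws.filter (fun w => pvE letter k w == j)) := by
  induction ws with
  | nil => intro f _; simp
  | cons w ws ih =>
    intro f h
    have hokw : pvKeyOk letter k w = true := h w List.mem_cons_self
    have hoks : ∀ w' ∈ ws, pvKeyOk letter k w' = true :=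
      fun w' hw' => h w' (List.mem_cons_of_mem _ hw')
    rw [List.foldl_cons,
        pv_getD_code hokw ((List.range k.toNat).map f) (by simp) [],
        pv_setD_code hokw ((List.range k.toNat).map f) (by simp),
        PySem.List.getD_map_range _ _ _ _ (pvE_lt hokw),
        pv_set_map_range,
        ih _ hoks]
    apply List.map_congr_left
    intro j hj
    simp only [List.mem_range] at hj
    by_cases hje : j = pvE letter k w
    · subst hje
      rw [if_pos rfl, List.filter_cons, if_pos (by simp)]
      simp [List.append_assoc]
    · have hb : (pvE letter k w == j) = false := by simp [Ne.symm hje]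
      rw [if_neg hje, List.filter_cons, if_neg (by simp [hb])]

lemma pv_replicate_map_range {α : Type} (m : Nat) (v : α) :
    List.replicate m v = (List.range m).map (fun _ => v) := by
  apply List.ext_getElem <;> simp

lemma pvA_eq (A : List String) (letter k : Int)
    (hok : ∀ w ∈ A, pvKeyOk letter k w = true) (hk : 0 < k) :
    counting_sort_word A letter k
      = (List.range A.length).map (fun p => (pvTgt letter k A).getD p "") := by
  have hcount : pvA_count letter A (List.replicate k.toNat 0)
      = (List.range k.toNat).map (fun j => (pvCnt letter k A j : Int)) := by
    have h1 : pvA_count letter A (List.replicate k.toNat 0)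
        = A.foldl (fun C w => PySem.List.pySetD C (pvIdxOf letter w)
            (PySem.List.pyGetD C (pvIdxOf letter w) 0 + 1)) (List.replicate k.toNat 0) :=
      PySem.List.foldl_pyRange_zero_pyGetD' A ""
        (fun C w => PySem.List.pySetD C (pvIdxOf letter w)
          (PySem.List.pyGetD C (pvIdxOf letter w) 0 + 1)) (List.replicate k.toNat 0)
    rw [h1, pv_replicate_map_range, pv_count_fold letter k A _ hok]
    apply List.map_congr_left
    intro j _
    simp [pvCnt, pvBucket, List.countP_eq_length_filter]
  have hprefix : pvA_prefix k ((List.range k.toNat).map (fun j => (pvCnt letter k A j : Int)))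
      = pvCspec letter k A A.length := by
    unfold pvA_prefix
    conv_lhs => rw [show PySem.List.pyRange 1 k 1 = PySem.List.pyRange 1 ((k.toNat : Int)) 1
      by rw [show ((k.toNat : Int)) = k by omega]]
    rw [pv_prefix_fold letter k A hk k.toNat (le_refl _)]
    apply List.map_congr_left
    intro j hj
    simp only [List.mem_range] at hj
    rw [if_pos hj]
    have hcfull : pvCntT letter k A A.length j = pvCnt letter k A j := by
      simp [pvCntT, pvCnt, pvBucket, List.take_length, List.countP_eq_length_filter]
    rw [pvOff_succ letter k A j, hcfull]
  have hBinit : (List.replicate A.length none : List (Option String))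
      = pvBspec letter k A A.length := by
    rw [pv_replicate_map_range]
    unfold pvBspec
    apply List.map_congr_left
    intro p hp
    simp only [List.mem_range] at hp
    have hplen : p < (pvTgt letter k A).length := by
      rw [pv_tgt_len letter k A hok]; exact hp
    obtain ⟨j, r, hj, hr, hpe⟩ := pv_tgt_decomp letter k A p hplen
    have htp : (pvTgt letter k A).getD p "" = (pvBucket letter k A j).getD r "" := by
      rw [hpe]; exact pv_tgt_getD letter k A j r hj hr
    have htpmem : (pvBucket letter k A j).getD r "" ∈ pvBucket letter k A j := by
      rw [List.getD_eq_getElem _ _ hr]; exact List.getElem_mem _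
    have hjp : pvE letter k ((pvTgt letter k A).getD p "") = j := by
      rw [htp]; exact pv_bucket_e htpmem
    have hcfull : pvCntT letter k A A.length j = pvCnt letter k A j := by
      simp [pvCntT, pvCnt, pvBucket, List.take_length, List.countP_eq_length_filter]
    rw [hjp, hcfull, if_neg (by omega)]
  have hplace : pvA_place letter A (pvBspec letter k A A.length, pvCspec letter k A A.length)
      = (pvBspec letter k A 0, pvCspec letter k A 0) := by
    unfold pvA_place
    rw [PySem.List.pyRange_neg_one_eq_reverse, show ((-1 : Int) + 1) = 0 from rfl,
        show ((A.length : Int) - 1 + 1) = (A.length : Int) by ring, List.foldl_reverse,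
        PySem.List.pyRange_one, show ((A.length : Int) - 0) = (A.length : Int) by ring]
    simp only [zero_add, Int.toNat_natCast]
    rw [List.foldr_map, List.range_eq_range']
    exact pv_place_fold letter k A hok A.length 0 (by omega)
  have hB0 : ∀ p : Nat, p < A.length →
      ((PySem.List.pyGetD (pvBspec letter k A 0) (p : Int) none).getD "")
        = (pvTgt letter k A).getD p "" := by
    intro p hp
    rw [PySem.List.pyGetD_natCast]
    unfold pvBspec
    rw [PySem.List.getD_map_range _ _ _ _ hp]
    have hplen : p < (pvTgt letter k A).length := by
      rw [pv_tgt_len letter k A hok]; exact hp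
    obtain ⟨j, r, hj, hr, hpe⟩ := pv_tgt_decomp letter k A p hplen
    have htp : (pvTgt letter k A).getD p "" = (pvBucket letter k A j).getD r "" := by
      rw [hpe]; exact pv_tgt_getD letter k A j r hj hr
    have htpmem : (pvBucket letter k A j).getD r "" ∈ pvBucket letter k A j := by
      rw [List.getD_eq_getElem _ _ hr]; exact List.getElem_mem _
    have hjp : pvE letter k ((pvTgt letter k A).getD p "") = j := by
      rw [htp]; exact pv_bucket_e htpmem
    have hc0 : pvCntT letter k A 0 j = 0 := by simp [pvCntT]
    rw [hjp, hc0, if_pos (by omega)]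
    rfl
  have hwrite : pvA_write A (pvBspec letter k A 0)
      = (List.range A.length).map (fun p => (pvTgt letter k A).getD p "") := by
    have h1 : pvA_write A (pvBspec letter k A 0)
        = (List.range A.length).map (fun p => (pvTgt letter k A).getD p "")
          ++ A.drop A.length :=
      pv_writeback _ _ A.length A (le_refl _) hB0
    rw [h1, List.drop_length, List.append_nil]
  unfold counting_sort_word
  rw [hcount, hprefix, hBinit, hplace]
  exact hwrite

lemma pvB_eq (A : List String) (letter k : Int)
    (hok : ∀ w ∈ A, pvKeyOk letter k w = true) (_hk : 0 < k) :
    counting_sort_word_alt A letter k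
      = (List.range A.length).map (fun p => (pvTgt letter k A).getD p "") := by
  have hb0 : ((PySem.List.pyRange 0 k 1).map (fun _ => ([] : List String)))
      = (List.range k.toNat).map (fun _ => ([] : List String)) := by
    rw [PySem.List.pyRange_one, List.map_map]
    simp [Function.comp_def]
  have hfill : pvB_fill letter A ((List.range k.toNat).map (fun _ => ([] : List String)))
      = (List.range k.toNat).map (pvBucket letter k A) := by
    unfold pvB_fill
    rw [pv_bucket_fold letter k A _ hok]
    apply List.map_congr_left
    intro j _
    simp [pvBucket]
  have hout : ((List.range k.toNat).map (pvBucket letter k A)).flatMap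
      (fun b => b) = pvTgt letter k A := by
    rw [show (fun (b : List String) => b) = @id (List String) from rfl, List.flatMap_id]
    rfl
  have hwrite : pvB_write A (pvTgt letter k A)
      = (List.range A.length).map (fun p => (pvTgt letter k A).getD p "") := by
    have hg : ∀ p : Nat, p < (pvTgt letter k A).length →
        PySem.List.pyGetD (pvTgt letter k A) (p : Int) "" = (pvTgt letter k A).getD p "" := by
      intro p _; rw [PySem.List.pyGetD_natCast]
    have h1 : pvB_write A (pvTgt letter k A)
        = (List.range (pvTgt letter k A).length).map
            (fun p => (pvTgt letter k A).getD p "")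
          ++ A.drop (pvTgt letter k A).length :=
      pv_writeback _ _ (pvTgt letter k A).length A (by rw [pv_tgt_len letter k A hok]) hg
    rw [h1, pv_tgt_len letter k A hok, List.drop_length, List.append_nil]
  have hstart : counting_sort_word_alt A letter k
      = pvB_write A ((pvB_fill letter A ((PySem.List.pyRange 0 k 1).map
          (fun _ => ([] : List String)))).flatMap (fun b => b)) := rfl
  rw [hstart, hb0, hfill, hout, hwrite]

-- ===== VERDICT (by name: the statement is the Claim_ definition above) =====
theorem counting_sort_word_spec : Claim_equal_counting_sort_word := by
  intro A letter k _hdom hpre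
  unfold Spec_counting_sort_word
  rcases A with _ | ⟨w, ws⟩
  · have hA : counting_sort_word ([] : List String) letter k = [] := by
      unfold counting_sort_word pvA_write
      rw [show ((List.length ([] : List String) : Int)) = 0 from rfl,
          PySem.List.pyRange_one_eq_nil (le_refl 0)]
      rfl
    have hout0 : (pvB_fill letter ([] : List String)
        ((PySem.List.pyRange 0 k 1).map (fun _ => ([] : List String)))).flatMap
          (fun b => b) = [] := by
      unfold pvB_fill
      simp
    have hB : counting_sort_word_alt ([] : List String) letter k = [] := by
      have h1 : counting_sort_word_alt ([] : List String) letter k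
          = pvB_write [] ((pvB_fill letter ([] : List String)
              ((PySem.List.pyRange 0 k 1).map (fun _ => ([] : List String)))).flatMap
                (fun b => b)) := rfl
      rw [h1, hout0]
      unfold pvB_write
      rw [show ((List.length ([] : List String) : Int)) = 0 from rfl,
          PySem.List.pyRange_one_eq_nil (le_refl 0)]
      rfl
    rw [hA, hB]
  · have hk : 0 < k := pv_kpos (hpre w (by simp))
    rw [pvA_eq _ _ _ hpre hk, pvB_eq _ _ _ hpre hk]
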